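-- pv_equiv track=rewrite | github.com/ecassmage/Advent-of-Code | 2022/Day 6/Quick Jargon.py | part1
-- ===== SOURCE A (Python) =====
-- def verify(stack):
--     for num, char in enumerate(stack):
--         if char in stack[num+1:]:
--             return False
--     return True
--
-- def part1(inp):
--     stack = []
--     for num, char in enumerate(inp):
--         if len(stack) == 4:
--             stack.pop(0)
--         stack.append(char)
--         if len(stack) == 4 and verify(stack):
--             return num+1
--
--     pass
-- ===== SOURCE B (Python) =====
-- def part1(inp):
--     seen = {}
--     left = 0
--     for i, c in enumerate(inp):
--         if c in seen and seen[c] >= left: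
--             left = seen[c] + 1
--         seen[c] = i
--         if i - left + 1 >= 4:
--             return i + 1
-- ===== Notes on version B (the rewrite author's own statement) =====
-- stated objective: alternative
-- what changed: Replaces the FIFO 4-char stack with its nested verify re-scan (slices at every window position) by a last-seen-index sliding window: a dict of most recent positions and a left pointer, one dict lookup and update per character.
import Mathlib
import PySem

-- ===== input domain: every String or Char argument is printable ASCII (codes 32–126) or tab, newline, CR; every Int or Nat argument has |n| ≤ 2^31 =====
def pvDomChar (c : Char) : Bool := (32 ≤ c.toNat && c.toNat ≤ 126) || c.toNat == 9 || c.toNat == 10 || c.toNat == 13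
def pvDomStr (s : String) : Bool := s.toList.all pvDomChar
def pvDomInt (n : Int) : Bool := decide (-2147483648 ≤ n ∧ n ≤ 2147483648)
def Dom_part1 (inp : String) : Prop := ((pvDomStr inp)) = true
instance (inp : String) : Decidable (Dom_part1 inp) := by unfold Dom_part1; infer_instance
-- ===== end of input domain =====

-- B replaces A's FIFO stack + quadratic distinctness re-check by a last-seen-index sliding window (alternative algorithm: one dict update per character, no window re-scan).

-- ===== PORT A =====
-- verify's loop: 'for num, char in enumerate(stack): if char in stack[num+1:]: return False'
-- 'stack[num+1:]' with a nonnegative index is exactly 'stack.drop (num+1)'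
def verifyLoop (stack : List Char) (num : Nat) : List Char → Bool
  | [] => true
  | ch :: rest =>
    if (stack.drop (num + 1)).contains ch then false else verifyLoop stack (num + 1) rest

def verify (stack : List Char) : Bool := verifyLoop stack 0 stack

def part1Loop (num : Nat) (stack : List Char) : List Char → Option Int
  | [] => none
  | c :: rest =>
    -- 'if len(stack) == 4: stack.pop(0)' then 'stack.append(char)'
    let stack1 := if stack.length == 4 then stack.drop 1 else stack
    let stack2 := stack1 ++ [c]
    if stack2.length == 4 && verify stack2 then some ((num : Int) + 1)
    else part1Loop (num + 1) stack2 rest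

def part1 (inp : String) : Option Int := part1Loop 0 [] inp.toList

-- ===== PORT B =====
def part1AltLoop (i : Nat) (seen : PySem.Dict Char Int) (left : Int) : List Char → Option Int
  | [] => none
  | c :: rest =>
    -- 'if c in seen and seen[c] >= left: left = seen[c] + 1'
    let left' := match seen.get? c with
      | some j => if left ≤ j then j + 1 else left
      | none => left
    let seen' := seen.insert c (i : Int)
    if 4 ≤ (i : Int) - left' + 1 then some ((i : Int) + 1)
    else part1AltLoop (i + 1) seen' left' rest

def part1_alt (inp : String) : Option Int := part1AltLoop 0 PySem.Dict.empty 0 inp.toList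

-- ===== PRECONDITION & SPEC =====
def Spec_part1 (inp : String) (out : Option Int) : Prop := out = part1_alt inp
instance (inp : String) (out : Option Int) : Decidable (Spec_part1 inp out) := by unfold Spec_part1; infer_instance

-- ===== CLAIM (what is proved, stated in full; the proofs are below) =====
def Claim_equal_part1 : Prop := ∀ (inp : String), Dom_part1 inp → Spec_part1 inp (part1 inp)

-- ===== LEMMAS AND PROOFS =====

-- index of the LAST occurrence of c in p (proof-side characterisation of B's `seen`)
def lastOcc : List Char → Char → Option Nat
  | [], _ => none
  | c' :: rest, c =>
    match lastOcc rest c with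
    | some j => some (j + 1)
    | none => if c' = c then some 0 else none

theorem lastOcc_eq_none {p : List Char} {c : Char} : lastOcc p c = none ↔ c ∉ p := by
  induction p with
  | nil => simp [lastOcc]
  | cons c' rest ih =>
    cases h : lastOcc rest c with
    | some j =>
      have hmem : c ∈ rest := by
        by_contra hn; rw [ih.mpr hn] at h; cases h
      simp [lastOcc, h, hmem]
    | none =>
      have hnotin : c ∉ rest := ih.mp h
      by_cases hc : c' = c
      · subst hc; simp [lastOcc, h]
      · simp [lastOcc, h, hc, hnotin]
        exact fun he => hc he.symm

theorem lastOcc_spec {c : Char} : ∀ (p : List Char) (j : Nat), lastOcc p c = some j →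
    p.drop j = c :: p.drop (j + 1) ∧ c ∉ p.drop (j + 1) := by
  intro p
  induction p with
  | nil => intro j h; cases h
  | cons c' rest ih =>
    intro j h
    simp only [lastOcc] at h
    cases hr : lastOcc rest c with
    | some j' =>
      rw [hr] at h
      injection h with h'
      subst h'
      simpa [List.drop_succ_cons] using ih j' hr
    | none =>
      rw [hr] at h
      by_cases hc : c' = c
      · simp only [hc] at h
        injection h with h'
        subst h'
        subst hc
        exact ⟨rfl, lastOcc_eq_none.mp hr⟩
      · simp [hc] at h

theorem lastOcc_append (p : List Char) (c c' : Char) :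
    lastOcc (p ++ [c]) c' = if c' = c then some p.length else lastOcc p c' := by
  induction p with
  | nil =>
    by_cases hc : c' = c
    · simp [lastOcc, hc]
    · have : ¬ c = c' := fun h => hc h.symm
      simp [lastOcc, hc, this]
  | cons a p ih =>
    by_cases hc : c' = c
    · subst hc
      simp [lastOcc, List.cons_append, ih]
    · simp [lastOcc, List.cons_append, ih, hc]

theorem verifyLoop_eq (stack : List Char) :
    ∀ (rest : List Char) (num : Nat), stack.drop num = rest →
      (verifyLoop stack num rest = true ↔ rest.Nodup) := by
  intro rest
  induction rest with
  | nil => intro num h; simp [verifyLoop]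
  | cons ch rest' ih =>
    intro num h
    have hdrop : stack.drop (num + 1) = rest' := by
      have := congrArg List.tail h
      simpa [List.tail_drop] using this
    simp only [verifyLoop, hdrop]
    by_cases hmem : ch ∈ rest'
    · simp [hmem, List.nodup_cons]
    · simp [hmem, List.nodup_cons, ih (num + 1) hdrop]

theorem verify_eq_nodup (s : List Char) : verify s = true ↔ s.Nodup :=
  verifyLoop_eq s s 0 rfl

theorem nodup_drop_mono {p : List Char} {a b : Nat} (hab : a ≤ b)
    (h : (p.drop a).Nodup) : (p.drop b).Nodup := by
  have he : p.drop b = (p.drop a).drop (b - a) := by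
    rw [List.drop_drop]
    congr 1
    omega
  rw [he]
  exact (List.drop_sublist _ _).nodup h

theorem not_nodup_append {l : List Char} (c : Char) (h : ¬ l.Nodup) : ¬ (l ++ [c]).Nodup :=
  fun hnd => h ((List.sublist_append_left l [c]).nodup hnd)

theorem stack_step (p : List Char) (c : Char) :
    (if (p.drop (p.length - 4)).length == 4 then (p.drop (p.length - 4)).drop 1
     else p.drop (p.length - 4)) ++ [c] = (p ++ [c]).drop ((p ++ [c]).length - 4) := by
  by_cases h4 : 4 ≤ p.length
  · have hlen : (p.drop (p.length - 4)).length = 4 := by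
      simp [List.length_drop]; omega
    rw [if_pos (by simp [hlen])]
    rw [List.drop_drop, List.drop_append]
    simp only [List.length_append, List.length_cons, List.length_nil]
    have h1 : p.length - 4 + 1 = p.length + 1 - 4 := by omega
    have h2 : p.length + 1 - 4 - p.length = 0 := by omega
    rw [h1, h2]
    rfl
  · have h0 : p.length - 4 = 0 := by omega
    have hne : (p.drop (p.length - 4)).length ≠ 4 := by
      simp [List.length_drop]; omega
    rw [if_neg (by simpa using hne)]
    have h3 : p.length - 3 = 0 := by omega
    simp [h0, h3]

theorem mainLoop : ∀ (rest p : List Char) (seen : PySem.Dict Char Int) (left : Int) (L : Nat),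
    (∀ c, seen.get? c = (lastOcc p c).map (fun (n : Nat) => (n : Int))) →
    left = (L : Int) →
    L ≤ p.length →
    (p.drop L).Nodup →
    (L = 0 ∨ ¬ (p.drop (L - 1)).Nodup) →
    part1Loop p.length (p.drop (p.length - 4)) rest = part1AltLoop p.length seen left rest := by
  intro rest
  induction rest with
  | nil => intro p seen left L _ _ _ _ _; rfl
  | cons c rest ih =>
    intro p seen left L hseen hleft hLle hnd hmin
    subst hleft
    -- the updated window start as a natural number
    set L' : Nat := (match lastOcc p c with
      | some j => if L ≤ j then j + 1 else L
      | none => L) with hL'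
    have hBleft : (match seen.get? c with
        | some j => if (L : Int) ≤ j then j + 1 else (L : Int)
        | none => (L : Int)) = (L' : Int) := by
      rw [hseen c]
      cases h : lastOcc p c with
      | none => simp [hL', h]
      | some j =>
        simp only [h, Option.map_some, hL']
        by_cases hLj : L ≤ j
        · rw [if_pos (by exact_mod_cast hLj), if_pos hLj]; push_cast; ring
        · rw [if_neg (by exact_mod_cast hLj), if_neg hLj]
    have hdropP : ∀ n, n ≤ p.length → (p ++ [c]).drop n = p.drop n ++ [c] := by
      intro n hn
      rw [List.drop_append]
      have : n - p.length = 0 := by omega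
      simp [this]
    have hle' : L' ≤ (p ++ [c]).length := by
      simp only [List.length_append, List.length_cons, List.length_nil]
      cases h : lastOcc p c with
      | none => simp [hL', h]; omega
      | some j =>
        have hj := (lastOcc_spec p j h).1
        have hjlt : j < p.length := by
          by_contra hge
          rw [List.drop_eq_nil_of_le (by omega)] at hj
          cases hj
        simp only [hL', h]
        split <;> omega
    have hnd' : ((p ++ [c]).drop L').Nodup := by
      cases h : lastOcc p c with
      | none =>
        have hcp : c ∉ p := lastOcc_eq_none.mp h
        have hL'L : L' = L := by simp [hL', h]
        rw [hL'L, hdropP L hLle]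
        have hcd : c ∉ p.drop L := fun hm => hcp ((List.drop_sublist _ _).subset hm)
        simp only [List.nodup_append, List.nodup_cons, List.not_mem_nil, not_false_iff,
          List.nodup_nil, true_and, and_true]
        exact ⟨hnd, fun a ha b hb hab => hcd (by simp at hb; exact hb ▸ hab ▸ ha)⟩
      | some j =>
        obtain ⟨hj1, hj2⟩ := lastOcc_spec p j h
        have hjlt : j < p.length := by
          by_contra hge
          rw [List.drop_eq_nil_of_le (by omega)] at hj1
          cases hj1
        by_cases hLj : L ≤ j
        · have hL'j : L' = j + 1 := by simp [hL', h, hLj]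
          have hndj : (p.drop (j + 1)).Nodup := nodup_drop_mono (by omega) hnd
          rw [hL'j, hdropP (j + 1) (by omega)]
          simp only [List.nodup_append, List.nodup_cons, List.not_mem_nil, not_false_iff,
            List.nodup_nil, true_and, and_true]
          exact ⟨hndj, fun a ha b hb hab => hj2 (by simp at hb; exact hb ▸ hab ▸ ha)⟩
        · have hL'L : L' = L := by simp [hL', h, hLj]
          have hcL : c ∉ p.drop L := by
            intro hm
            have : p.drop L = (p.drop (j + 1)).drop (L - (j + 1)) := by
              rw [List.drop_drop]; congr 1; omega
            rw [this] at hm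
            exact hj2 ((List.drop_sublist _ _).subset hm)
          rw [hL'L, hdropP L hLle]
          simp only [List.nodup_append, List.nodup_cons, List.not_mem_nil, not_false_iff,
            List.nodup_nil, true_and, and_true]
          exact ⟨hnd, fun a ha b hb hab => hcL (by simp at hb; exact hb ▸ hab ▸ ha)⟩
    have hmin' : L' = 0 ∨ ¬ ((p ++ [c]).drop (L' - 1)).Nodup := by
      cases h : lastOcc p c with
      | none =>
        have hL'L : L' = L := by simp [hL', h]
        rw [hL'L]
        rcases hmin with h0 | hbad
        · exact Or.inl h0
        · refine Or.inr ?_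
          rw [hdropP (L - 1) (by omega)]
          exact not_nodup_append c hbad
      | some j =>
        obtain ⟨hj1, hj2⟩ := lastOcc_spec p j h
        have hjlt : j < p.length := by
          by_contra hge
          rw [List.drop_eq_nil_of_le (by omega)] at hj1
          cases hj1
        by_cases hLj : L ≤ j
        · have hL'j : L' = j + 1 := by simp [hL', h, hLj]
          refine Or.inr ?_
          rw [hL'j]
          have : (p ++ [c]).drop (j + 1 - 1) = c :: (p.drop (j + 1) ++ [c]) := by
            simpa [hj1] using hdropP j (by omega)
          rw [this]
          simp [List.nodup_cons]
        · have hL'L : L' = L := by simp [hL', h, hLj]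
          rw [hL'L]
          rcases hmin with h0 | hbad
          · exact Or.inl h0
          · refine Or.inr ?_
            rw [hdropP (L - 1) (by omega)]
            exact not_nodup_append c hbad
    have hseen' : ∀ c', (seen.insert c ((p.length : Nat) : Int)).get? c'
        = (lastOcc (p ++ [c]) c').map (fun (n : Nat) => (n : Int)) := by
      intro c'
      rw [lastOcc_append]
      by_cases hc : c' = c
      · subst hc
        simp [PySem.Dict.get?_insert_self]
      · rw [PySem.Dict.get?_insert_of_ne seen _ hc, if_neg hc]
        exact hseen c'
    -- the two return conditions are equivalent
    have hcond : (4 ≤ (p.length : Int) - (L' : Int) + 1) ↔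
        (((p ++ [c]).drop ((p ++ [c]).length - 4)).length = 4 ∧
         ((p ++ [c]).drop ((p ++ [c]).length - 4)).Nodup) := by
      have hlenp' : (p ++ [c]).length = p.length + 1 := by simp
      have hlendrop : ((p ++ [c]).drop ((p ++ [c]).length - 4)).length
          = (p.length + 1) - (p.length + 1 - 4) := by
        simp [List.length_drop]
      constructor
      · intro hB
        have hL'3 : L' + 3 ≤ p.length := by omega
        have h4 : (p.length + 1) - (p.length + 1 - 4) = 4 := by omega
        refine ⟨by rw [hlendrop, h4], ?_⟩
        have : (p ++ [c]).length - 4 = p.length - 3 := by omega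
        rw [this]
        exact nodup_drop_mono (by omega) hnd'
      · rintro ⟨hlen4, hnodup⟩
        rw [hlendrop] at hlen4
        have h3n : 3 ≤ p.length := by omega
        have hidx : (p ++ [c]).length - 4 = p.length - 3 := by omega
        rw [hidx] at hnodup
        have hL'le : L' ≤ p.length - 3 := by
          by_contra hgt
          rcases hmin' with h0 | hbad
          · omega
          · exact hbad (nodup_drop_mono (by omega) hnodup)
        omega
    -- one step of both loops
    simp only [part1Loop, part1AltLoop, hBleft]
    rw [stack_step]
    by_cases hB : (4 ≤ (p.length : Int) - (L' : Int) + 1)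
    · obtain ⟨hlen4, hnodup⟩ := hcond.mp hB
      rw [if_pos hB, if_pos (by
        simp only [Bool.and_eq_true, beq_iff_eq, verify_eq_nodup]
        exact ⟨hlen4, hnodup⟩)]
    · rw [if_neg hB, if_neg (by
        simp only [Bool.and_eq_true, beq_iff_eq, verify_eq_nodup]
        rintro ⟨h1, h2⟩
        exact hB (hcond.mpr ⟨h1, h2⟩))]
      have := ih (p ++ [c]) (seen.insert c ((p.length : Nat) : Int)) ((L' : Nat) : Int) L'
        hseen' rfl hle' hnd' hmin'
      simpa [List.length_append] using this
-- ===== VERDICT (by name: the statement is the Claim_ definition above) =====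
theorem part1_spec : Claim_equal_part1 := by
  intro inp _
  unfold Spec_part1 part1 part1_alt
  have := mainLoop inp.toList [] PySem.Dict.empty 0 0
    (by intro c; simp [PySem.Dict.get?, PySem.Dict.empty, lastOcc]) rfl (by simp) (by simp) (Or.inl rfl)
  simpa using this
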